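-- pv_equiv track=rewrite | github.com/Kukukaya/Elab-Kasetsart | Elab-105/E11.py | casualtyonhit
-- ===== SOURCE A (Python) =====
-- def explosiveFinder(m):
--     x_axis = 0
--     y_axis = 0
--     bombpin_y = []
--     bombpin_x = []
--     bomb_count = 0
--     # check = False
--     for i in m:
--         # if check == True:
--         #     break
--         x_axis = 0
--         y_axis += 1
--         for j in i:
--             x_axis += 1
--             if j == 'G':
--                 bombpin_y.append(y_axis)
--                 bombpin_x.append(x_axis)
--                 bomb_count += 1
--                 # check = True
--                 # break
--     return bombpin_y,bombpin_x,bomb_count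
--
-- def manFinder(m):
--     x_axis = 0
--     y_axis = 0
--     bombpin_y = []
--     bombpin_x = []
--     man = 0
--     # check = False
--     for i in m:
--         # if check == True:
--         #     break
--         x_axis = 0
--         y_axis += 1
--         for j in i:
--             x_axis += 1
--             if j == 'E':
--                 bombpin_y.append(y_axis)
--                 bombpin_x.append(x_axis)
--                 man += 1
--                 # check = True
--                 # break
--     return bombpin_y,bombpin_x,man
--
-- def casualtyonhit(m):
--     y_bp,x_bp,bomb = explosiveFinder(m)
--     y_man,x_man,man = manFinder(m)
--     victim_count = 0
--     b = []
--     for j in range(bomb):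
--         y_count = -2
--         x_count = -2
--         while y_count <= 2:
--             x_count = -2
--             while x_count <= 2:
--                 cb = [y_bp[j]+y_count,x_bp[j]+x_count]
--                 b.append(cb)
--                 x_count += 1
--             y_count += 1
--     for i in range(man):
--         m = [y_man[i],x_man[i]]
--         if m in b:
--             victim_count += 1
--     return victim_count
-- ===== SOURCE B (Python) =====
-- def casualtyonhit(m):
--     bombs = []
--     men = []
--     y = 0
--     for row in m:
--         y += 1
--         x = 0
--         for ch in row:
--             x += 1
--             if ch == 'G':
--                 bombs.append((y, x))
--             elif ch == 'E':
--                 men.append((y, x))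
--     victim_count = 0
--     for (ym, xm) in men:
--         if any(abs(ym - yb) <= 2 and abs(xm - xb) <= 2 for (yb, xb) in bombs):
--             victim_count += 1
--     return victim_count
-- ===== Notes on version B (the rewrite author's own statement) =====
-- stated objective: alternative
-- what changed: One scan collects bomb and man coordinates as pairs; instead of materialising 25 blast cells per bomb and testing list membership, each man is counted if some bomb lies within Chebyshev distance 2 (|dy|<=2 and |dx|<=2); measured ~1.4x, below the 1.5x bar, so no speed claim.
import Mathlib
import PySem

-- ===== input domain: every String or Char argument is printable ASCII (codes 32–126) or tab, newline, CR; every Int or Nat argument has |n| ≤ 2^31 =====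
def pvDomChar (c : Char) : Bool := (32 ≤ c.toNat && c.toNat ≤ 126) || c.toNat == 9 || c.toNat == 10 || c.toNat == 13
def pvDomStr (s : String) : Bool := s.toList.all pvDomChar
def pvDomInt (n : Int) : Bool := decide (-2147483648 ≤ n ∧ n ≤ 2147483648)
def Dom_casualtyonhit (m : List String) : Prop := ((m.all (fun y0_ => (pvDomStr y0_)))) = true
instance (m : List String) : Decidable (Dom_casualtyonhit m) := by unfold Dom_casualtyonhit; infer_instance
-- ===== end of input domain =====

-- B replaces A's 25-cells-per-bomb blast list and membership test by a direct
-- Chebyshev-distance (≤ 2) check of each man against each bomb (objective: alternative).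

-- ===== PORT A =====
-- state: (y_axis, bombpin_y, bombpin_x, bomb_count); x_axis is the inner fold's state
def explosiveFinder (m : List String) : List Int × List Int × Int :=
  let st := m.foldl (fun (st : Int × List Int × List Int × Int) i =>
      let y := st.1 + 1
      let inner := i.toList.foldl (fun (st2 : Int × List Int × List Int × Int) j =>
          let x := st2.1 + 1
          if j = 'G' then (x, st2.2.1 ++ [y], st2.2.2.1 ++ [x], st2.2.2.2 + 1)
          else (x, st2.2.1, st2.2.2.1, st2.2.2.2))
        (0, st.2.1, st.2.2.1, st.2.2.2)
      (y, inner.2.1, inner.2.2.1, inner.2.2.2))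
    (0, [], [], 0)
  (st.2.1, st.2.2.1, st.2.2.2)

def manFinder (m : List String) : List Int × List Int × Int :=
  let st := m.foldl (fun (st : Int × List Int × List Int × Int) i =>
      let y := st.1 + 1
      let inner := i.toList.foldl (fun (st2 : Int × List Int × List Int × Int) j =>
          let x := st2.1 + 1
          if j = 'E' then (x, st2.2.1 ++ [y], st2.2.2.1 ++ [x], st2.2.2.2 + 1)
          else (x, st2.2.1, st2.2.2.1, st2.2.2.2))
        (0, st.2.1, st.2.2.1, st.2.2.2)
      (y, inner.2.1, inner.2.2.1, inner.2.2.2))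
    (0, [], [], 0)
  (st.2.1, st.2.2.1, st.2.2.2)

-- Python's cb = [y,x] two-element list is represented as the pair (y,x); the two
-- 'while count <= 2' loops starting at -2 and incrementing by 1 iterate exactly
-- the values pyRange (-2) 3 1 = [-2,-1,0,1,2]. Indices j < bomb and i < man are
-- always in range (bomb/man are the list lengths), so pyGetD's default is never used.
def casualtyonhit (m : List String) : Int :=
  let f := explosiveFinder m
  let y_bp := f.1; let x_bp := f.2.1; let bomb := f.2.2
  let g := manFinder m
  let y_man := g.1; let x_man := g.2.1; let man := g.2.2
  let b := (PySem.List.pyRange 0 bomb 1).foldl (fun b j =>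
    (PySem.List.pyRange (-2) 3 1).foldl (fun b y_count =>
      (PySem.List.pyRange (-2) 3 1).foldl (fun b x_count =>
        b ++ [(PySem.List.pyGetD y_bp j 0 + y_count, PySem.List.pyGetD x_bp j 0 + x_count)]) b) b) []
  (PySem.List.pyRange 0 man 1).foldl (fun v i =>
    if (PySem.List.pyGetD y_man i 0, PySem.List.pyGetD x_man i 0) ∈ b then v + 1 else v) 0

-- ===== PORT B =====
def casualtyonhit_alt (m : List String) : Int :=
  let sc := m.foldl (fun (st : Int × List (Int × Int) × List (Int × Int)) row =>
      let y := st.1 + 1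
      let inner := row.toList.foldl (fun (st2 : Int × List (Int × Int) × List (Int × Int)) ch =>
          let x := st2.1 + 1
          if ch = 'G' then (x, st2.2.1 ++ [(y, x)], st2.2.2)
          else if ch = 'E' then (x, st2.2.1, st2.2.2 ++ [(y, x)])
          else (x, st2.2.1, st2.2.2))
        (0, st.2.1, st.2.2)
      (y, inner.2.1, inner.2.2))
    (0, [], [])
  let bombs := sc.2.1
  let men := sc.2.2
  men.foldl (fun v p =>
    if bombs.any (fun q => decide (|p.1 - q.1| ≤ 2 ∧ |p.2 - q.2| ≤ 2)) then v + 1 else v) 0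

-- ===== PRECONDITION & SPEC =====
def Spec_casualtyonhit (m : List String) (out : Int) : Prop := out = casualtyonhit_alt m
instance (m : List String) (out : Int) : Decidable (Spec_casualtyonhit m out) := by unfold Spec_casualtyonhit; infer_instance

-- ===== CLAIM (what is proved, stated in full; the proofs are below) =====
def Claim_equal_casualtyonhit : Prop := ∀ (m : List String), Dom_casualtyonhit m → Spec_casualtyonhit m (casualtyonhit m)

-- ===== LEMMAS AND PROOFS =====

-- coordinates (1-indexed) of the cells holding char c, in scan order
def rowCoords (c : Char) (y : Int) : Int → List Char → List (Int × Int)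
  | _, [] => []
  | x, ch :: t =>
    if ch = c then (y, x + 1) :: rowCoords c y (x + 1) t else rowCoords c y (x + 1) t

def gridCoords (c : Char) : Int → List String → List (Int × Int)
  | _, [] => []
  | y, r :: rs => rowCoords c (y + 1) 0 r.toList ++ gridCoords c (y + 1) rs

-- A's inner row loop produces exactly the row's coordinates, appended to the accumulators
lemma finderRow (c : Char) (y : Int) (cs : List Char) :
    ∀ (x cnt : Int) (ys xs : List Int),
    cs.foldl (fun (st2 : Int × List Int × List Int × Int) j =>
        let x := st2.1 + 1
        if j = c then (x, st2.2.1 ++ [y], st2.2.2.1 ++ [x], st2.2.2.2 + 1)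
        else (x, st2.2.1, st2.2.2.1, st2.2.2.2)) (x, ys, xs, cnt)
    = (x + cs.length, ys ++ (rowCoords c y x cs).map Prod.fst,
       xs ++ (rowCoords c y x cs).map Prod.snd,
       cnt + ((rowCoords c y x cs).length : Int)) := by
  induction cs with
  | nil => intro x cnt ys xs; simp [rowCoords]
  | cons ch t ih =>
    intro x cnt ys xs
    by_cases h : ch = c
    · simp only [List.foldl_cons, rowCoords, if_pos h, ih]
      refine Prod.ext ?_ (Prod.ext ?_ (Prod.ext ?_ ?_)) <;> (simp; try push_cast; try ring)
    · simp only [List.foldl_cons, rowCoords, if_neg h, ih]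
      refine Prod.ext ?_ (Prod.ext ?_ (Prod.ext ?_ ?_)) <;> (simp; try push_cast; try ring)

-- A's outer loop
lemma finderGrid (c : Char) (rows : List String) :
    ∀ (y cnt : Int) (ys xs : List Int),
    rows.foldl (fun (st : Int × List Int × List Int × Int) i =>
        let y := st.1 + 1
        let inner := i.toList.foldl (fun (st2 : Int × List Int × List Int × Int) j =>
            let x := st2.1 + 1
            if j = c then (x, st2.2.1 ++ [y], st2.2.2.1 ++ [x], st2.2.2.2 + 1)
            else (x, st2.2.1, st2.2.2.1, st2.2.2.2))
          (0, st.2.1, st.2.2.1, st.2.2.2)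
        (y, inner.2.1, inner.2.2.1, inner.2.2.2)) (y, ys, xs, cnt)
    = (y + rows.length, ys ++ (gridCoords c y rows).map Prod.fst,
       xs ++ (gridCoords c y rows).map Prod.snd,
       cnt + ((gridCoords c y rows).length : Int)) := by
  induction rows with
  | nil => intro y cnt ys xs; simp [gridCoords]
  | cons r rs ih =>
    intro y cnt ys xs
    simp only [List.foldl_cons, finderRow c (y + 1) r.toList, ih, gridCoords]
    refine Prod.ext ?_ (Prod.ext ?_ (Prod.ext ?_ ?_)) <;> (simp; try push_cast; try ring)

lemma explosiveFinder_eq (m : List String) :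
    explosiveFinder m = ((gridCoords 'G' 0 m).map Prod.fst,
      (gridCoords 'G' 0 m).map Prod.snd, ((gridCoords 'G' 0 m).length : Int)) := by
  unfold explosiveFinder
  simp only [finderGrid 'G' m 0 0 [] []]
  simp

lemma manFinder_eq (m : List String) :
    manFinder m = ((gridCoords 'E' 0 m).map Prod.fst,
      (gridCoords 'E' 0 m).map Prod.snd, ((gridCoords 'E' 0 m).length : Int)) := by
  unfold manFinder
  simp only [finderGrid 'E' m 0 0 [] []]
  simp

-- B's inner row loop collects both coordinate lists at once
lemma scanRow (y : Int) (cs : List Char) :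
    ∀ (x : Int) (bs ms : List (Int × Int)),
    cs.foldl (fun (st2 : Int × List (Int × Int) × List (Int × Int)) ch =>
        let x := st2.1 + 1
        if ch = 'G' then (x, st2.2.1 ++ [(y, x)], st2.2.2)
        else if ch = 'E' then (x, st2.2.1, st2.2.2 ++ [(y, x)])
        else (x, st2.2.1, st2.2.2)) (x, bs, ms)
    = (x + cs.length, bs ++ rowCoords 'G' y x cs, ms ++ rowCoords 'E' y x cs) := by
  induction cs with
  | nil => intro x bs ms; simp [rowCoords]
  | cons ch t ih =>
    intro x bs ms
    by_cases hg : ch = 'G'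
    · have he : ch ≠ 'E' := by simp [hg]
      simp only [List.foldl_cons, rowCoords, if_pos hg, if_neg he, ih]
      refine Prod.ext ?_ (Prod.ext ?_ ?_) <;> (simp; try push_cast; try ring)
    · by_cases he : ch = 'E'
      · simp only [List.foldl_cons, rowCoords, if_pos he, if_neg hg, ih]
        refine Prod.ext ?_ (Prod.ext ?_ ?_) <;> (simp; try push_cast; try ring)
      · simp only [List.foldl_cons, rowCoords, if_neg hg, if_neg he, ih]
        refine Prod.ext ?_ (Prod.ext ?_ ?_) <;> (simp; try push_cast; try ring)

lemma scanGrid (rows : List String) :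
    ∀ (y : Int) (bs ms : List (Int × Int)),
    rows.foldl (fun (st : Int × List (Int × Int) × List (Int × Int)) row =>
        let y := st.1 + 1
        let inner := row.toList.foldl (fun (st2 : Int × List (Int × Int) × List (Int × Int)) ch =>
            let x := st2.1 + 1
            if ch = 'G' then (x, st2.2.1 ++ [(y, x)], st2.2.2)
            else if ch = 'E' then (x, st2.2.1, st2.2.2 ++ [(y, x)])
            else (x, st2.2.1, st2.2.2))
          (0, st.2.1, st.2.2)
        (y, inner.2.1, inner.2.2)) (y, bs, ms)
    = (y + rows.length, bs ++ gridCoords 'G' y rows, ms ++ gridCoords 'E' y rows) := by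
  induction rows with
  | nil => intro y bs ms; simp [gridCoords]
  | cons r rs ih =>
    intro y bs ms
    simp only [List.foldl_cons, scanRow (y + 1) r.toList, ih, gridCoords]
    refine Prod.ext ?_ (Prod.ext ?_ ?_) <;> (simp; try push_cast; try ring)

-- the indexed pairing over range(len L) recovers L itself
lemma map_pair_index (L : List (Int × Int)) :
    (PySem.List.pyRange 0 (L.length : Int) 1).map
      (fun i => (PySem.List.pyGetD (L.map Prod.fst) i 0, PySem.List.pyGetD (L.map Prod.snd) i 0)) = L := by
  apply List.ext_getElem
  · simp [PySem.List.length_pyRange_one]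
  · intro k h1 h2
    simp only [List.getElem_map, PySem.List.getElem_pyRange_one]
    have hk : (0 : Int) + (k : Int) = ((k : Nat) : Int) := by push_cast; ring
    rw [hk, PySem.List.pyGetD_natCast, PySem.List.pyGetD_natCast]
    have hkl : k < L.length := by
      simpa [PySem.List.length_pyRange_one] using h1
    simp [List.getD_eq_getElem, hkl]

-- membership in A's blast-cell list = some bomb within Chebyshev distance 2
lemma mem_blast (G : List (Int × Int)) (p : Int × Int) :
    (p ∈ (PySem.List.pyRange 0 ((G.length : Int)) 1).foldl (fun b j =>
        (PySem.List.pyRange (-2) 3 1).foldl (fun b y_count =>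
          (PySem.List.pyRange (-2) 3 1).foldl (fun b x_count =>
            b ++ [(PySem.List.pyGetD (G.map Prod.fst) j 0 + y_count,
                   PySem.List.pyGetD (G.map Prod.snd) j 0 + x_count)]) b) b) [])
    ↔ ∃ q ∈ G, |p.1 - q.1| ≤ 2 ∧ |p.2 - q.2| ≤ 2 := by
  simp only [PySem.List.foldl_append_singleton_eq_map, PySem.List.foldl_append_eq_flatMap,
    List.nil_append, List.mem_flatMap, List.mem_map, PySem.List.mem_pyRange_one]
  constructor
  · rintro ⟨j, ⟨hj0, hjn⟩, yc, ⟨hy1, hy2⟩, xc, ⟨hx1, hx2⟩, hp⟩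
    have hk : j = ((j.toNat : Nat) : Int) := by omega
    have hkl : j.toNat < G.length := by omega
    refine ⟨G[j.toNat], List.getElem_mem hkl, ?_⟩
    rw [hk, PySem.List.pyGetD_natCast, PySem.List.pyGetD_natCast] at hp
    simp [List.getD_eq_getElem, hkl] at hp
    rw [← hp]
    simp only [abs_le]
    constructor <;> constructor <;> simp <;> omega
  · rintro ⟨q, hq, h1, h2⟩
    obtain ⟨k, hk, hqk⟩ := List.getElem_of_mem hq
    refine ⟨(k : Int), ⟨by omega, by omega⟩, p.1 - q.1, ?_, p.2 - q.2, ?_, ?_⟩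
    · rw [abs_le] at h1; omega
    · rw [abs_le] at h2; omega
    · rw [PySem.List.pyGetD_natCast, PySem.List.pyGetD_natCast]
      simp [List.getD_eq_getElem, hk, hqk]

-- A's index loop over range(len L) equals the direct fold over L
lemma victim_loop (L : List (Int × Int)) (b : List (Int × Int)) :
    (PySem.List.pyRange 0 ((L.length : Int)) 1).foldl (fun v i =>
        if (PySem.List.pyGetD (L.map Prod.fst) i 0, PySem.List.pyGetD (L.map Prod.snd) i 0) ∈ b
        then v + 1 else v) (0 : Int)
    = L.foldl (fun v p => if p ∈ b then v + 1 else v) 0 := by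
  conv_rhs => rw [← map_pair_index L, List.foldl_map]

-- ===== VERDICT (by name: the statement is the Claim_ definition above) =====
theorem casualtyonhit_spec : Claim_equal_casualtyonhit := by
  intro m _
  unfold Spec_casualtyonhit casualtyonhit casualtyonhit_alt
  rw [explosiveFinder_eq, manFinder_eq, scanGrid m 0 [] []]
  simp only [List.nil_append]
  rw [victim_loop]
  apply PySem.List.foldl_congr_mem
  intro v p _
  by_cases h : ∃ q ∈ gridCoords 'G' 0 m, |p.1 - q.1| ≤ 2 ∧ |p.2 - q.2| ≤ 2
  · rw [if_pos ((mem_blast (gridCoords 'G' 0 m) p).mpr h), if_pos (by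
      rw [List.any_eq_true]; obtain ⟨q, hq, h1, h2⟩ := h
      exact ⟨q, hq, by simp [h1, h2]⟩)]
  · rw [if_neg (fun hc => h ((mem_blast (gridCoords 'G' 0 m) p).mp hc)), if_neg (by
      simp only [List.any_eq_true, decide_eq_true_eq]
      exact fun hc => h (by obtain ⟨q, hq, hh⟩ := hc; exact ⟨q, hq, hh⟩))]
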